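-- pv_equiv track=rewrite | github.com/Checkmk/checkmk | packages/werks/werks/parse.py | parse_werk_v1
-- ===== SOURCE A (Python) =====
-- from typing import NamedTuple
--
-- class WerkV1ParseResult(NamedTuple):
--     metadata: dict[str, str]
--     description: list[str]
--
-- def parse_werk_v1(content: str, werk_id: int) -> WerkV1ParseResult:
--     """
--     parse werk v1 but do not validate, or transform description
--     """
--     werk: dict[str, str] = {
--         "compatible": "compat",
--         "edition": "cre",
--         "id": str(werk_id),
--     }
--     description = []
--     in_header = True
--     for line in content.split("\n"):
--         if in_header and not line.strip():
--             in_header = False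
--         elif in_header:
--             key, text = line.split(":", 1)
--             try:
--                 value = str(int(text.strip()))
--             except ValueError:
--                 value = text.strip()
--             field = key.lower()
--             werk[field] = value
--         else:
--             description.append(line)
--
--     while description and description[-1] == "":
--         description.pop()
--
--     return WerkV1ParseResult(werk, description)
-- ===== SOURCE B (Python) =====
-- from typing import NamedTuple
--
-- class WerkV1ParseResult(NamedTuple):
--     metadata: dict[str, str]
--     description: list[str]
--
-- def parse_werk_v1(content: str, werk_id: int) -> WerkV1ParseResult:
--     """parse werk v1: split at the first blank line, then parse header and trim description"""
--     lines = content.split("\n")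
--     sep = next((i for i, l in enumerate(lines) if not l.strip()), None)
--     if sep is None:
--         header, description = lines, []
--     else:
--         header, description = lines[:sep], lines[sep + 1:]
--
--     cut = len(description)
--     while cut and description[cut - 1] == "":
--         cut -= 1
--     description = description[:cut]
--
--     werk: dict[str, str] = {
--         "compatible": "compat",
--         "edition": "cre",
--         "id": str(werk_id),
--     }
--     for line in header:
--         key, text = line.split(":", 1)
--         text = text.strip()
--         try:
--             text = str(int(text))
--         except ValueError:
--             pass
--         werk[key.lower()] = text
--
--     return WerkV1ParseResult(werk, description)
-- ===== Notes on version B (the rewrite author's own statement) =====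
-- stated objective: alternative
-- what changed: Instead of one loop over all lines with an in_header flag, B first locates the first blank line, splits the lines into a header slice and a description slice (trimming trailing empty lines by computing a cut index), and then parses only the header slice.
import Mathlib
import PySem

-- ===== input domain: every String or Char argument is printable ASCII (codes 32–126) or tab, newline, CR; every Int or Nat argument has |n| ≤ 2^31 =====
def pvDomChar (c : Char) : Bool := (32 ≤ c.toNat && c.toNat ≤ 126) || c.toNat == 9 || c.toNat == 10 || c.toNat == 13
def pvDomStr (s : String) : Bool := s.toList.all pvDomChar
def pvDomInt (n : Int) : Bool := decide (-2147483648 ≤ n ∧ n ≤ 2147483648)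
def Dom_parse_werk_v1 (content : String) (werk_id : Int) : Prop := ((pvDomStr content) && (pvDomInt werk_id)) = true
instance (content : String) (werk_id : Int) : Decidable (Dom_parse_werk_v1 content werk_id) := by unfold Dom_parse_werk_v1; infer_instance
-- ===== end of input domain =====

-- B replaces A's single flagged loop by: find the first blank line, slice into header/description, parse only the header (alternative decomposition, same cost).


-- ===== PORT A =====
-- `while description and description[-1] == "": description.pop()`
def pvPopTrailing (l : List String) : List String :=
  if h : l.getLast? = some "" then pvPopTrailing l.dropLast else l
termination_by l.length
decreasing_by
  have hne : l ≠ [] := by intro e; simp [e] at h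
  have := List.length_pos_iff.mpr hne
  simp [List.length_dropLast]; omega

-- one step of A's `for line in content.split("\n")` loop (state: werk, description, in_header)
def pvStepA (st : PySem.Dict String String × List String × Bool) (line : String) :
    PySem.Dict String String × List String × Bool :=
  let (werk, description, in_header) := st
  if in_header && (PySem.Str.strip line == "") then
    (werk, description, false)
  else if in_header then
    match PySem.Str.splitMax? line ":" 1 with
    | some [key, text] =>
      let value :=
        match PySem.Int.ofStr? (PySem.Str.strip text) with
        | some n => PySem.Int.toStr n
        | none => PySem.Str.strip text
      (werk.insert (PySem.Str.lower key) value, description, in_header)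
    | _ => (werk, description, in_header)  -- Python raises ValueError here (no ':'); excluded by Pre_
  else
    (werk, description ++ [line], in_header)

def parse_werk_v1 (content : String) (werk_id : Int) : (List (String × String)) × List String :=
  let werk : PySem.Dict String String :=
    PySem.Dict.ofList [("compatible", "compat"), ("edition", "cre"), ("id", PySem.Int.toStr werk_id)]
  let st := ((PySem.Str.split? content "\n").getD []).foldl pvStepA (werk, [], true)
  (st.1.items, pvPopTrailing st.2.1)

-- ===== PORT B =====
-- `cut = len(description); while cut and description[cut-1] == "": cut -= 1`
def pvCut (d : List String) : Nat → Nat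
  | 0 => 0
  | k + 1 => if d.getD k "" == "" then pvCut d k else k + 1

-- header-line parsing of B's `for line in header` loop
def pvStepB (w : PySem.Dict String String) (line : String) : PySem.Dict String String :=
  match PySem.Str.splitMax? line ":" 1 with
  | some [key, text] =>
    let t := PySem.Str.strip text
    let t :=
      match PySem.Int.ofStr? t with
      | some n => PySem.Int.toStr n
      | none => t
    w.insert (PySem.Str.lower key) t
  | _ => w  -- Python raises ValueError here (no ':'); excluded by Pre_

def parse_werk_v1_alt (content : String) (werk_id : Int) : (List (String × String)) × List String :=
  let lines := (PySem.Str.split? content "\n").getD []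
  let (header, description) :=
    match lines.findIdx? (fun l => PySem.Str.strip l == "") with
    | none => (lines, ([] : List String))
    | some i => (lines.take i, lines.drop (i + 1))
  let description := description.take (pvCut description description.length)
  let werk : PySem.Dict String String :=
    PySem.Dict.ofList [("compatible", "compat"), ("edition", "cre"), ("id", PySem.Int.toStr werk_id)]
  ((header.foldl pvStepB werk).items, description)

-- ===== PRECONDITION & SPEC =====
-- Pre_ excludes exactly the inputs where Python A raises ValueError: a line before the
-- first blank(-after-strip) line that contains no ':' (the 2-way unpack of line.split(':', 1) fails).
def Pre_parse_werk_v1 (content : String) (werk_id : Int) : Prop :=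
  (((PySem.Str.split? content "\n").getD []).takeWhile
      (fun l => !(PySem.Str.strip l == ""))).all (fun l => PySem.Str.isIn ":" l) = true
instance (content : String) (werk_id : Int) : Decidable (Pre_parse_werk_v1 content werk_id) := by
  unfold Pre_parse_werk_v1; infer_instance

def pvWitness_parse_werk_v1 : String × Int := ("title: hello world\nclass: fix\n\nSome text.\n", 123)

def Spec_parse_werk_v1 (content : String) (werk_id : Int) (out : (List (String × String)) × List String) : Prop := out = parse_werk_v1_alt content werk_id
instance (content : String) (werk_id : Int) (out : (List (String × String)) × List String) : Decidable (Spec_parse_werk_v1 content werk_id out) := by unfold Spec_parse_werk_v1; infer_instance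

-- ===== CLAIM (what is proved, stated in full; the proofs are below) =====
def Claim_equal_parse_werk_v1 : Prop := ∀ (content : String) (werk_id : Int), Dom_parse_werk_v1 content werk_id → Pre_parse_werk_v1 content werk_id → Spec_parse_werk_v1 content werk_id (parse_werk_v1 content werk_id)

-- ===== LEMMAS AND PROOFS =====

theorem pvWitness_ok :
    Dom_parse_werk_v1 pvWitness_parse_werk_v1.1 pvWitness_parse_werk_v1.2 ∧
    Pre_parse_werk_v1 pvWitness_parse_werk_v1.1 pvWitness_parse_werk_v1.2 := by decide

-- after the blank line A only appends lines to the description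
theorem foldA_false (lines : List String) (w : PySem.Dict String String) (d : List String) :
    lines.foldl pvStepA (w, d, false) = (w, d ++ lines, false) := by
  induction lines generalizing d with
  | nil => simp
  | cons l ls ih => simp [pvStepA, ih]

-- A's flagged fold = B's split-at-first-blank decomposition
theorem foldA_true (lines : List String) (w : PySem.Dict String String) (d : List String) :
    lines.foldl pvStepA (w, d, true) =
      match lines.findIdx? (fun l => PySem.Str.strip l == "") with
      | none => (lines.foldl pvStepB w, d, true)
      | some i => ((lines.take i).foldl pvStepB w, d ++ lines.drop (i + 1), false) := by
  induction lines generalizing w with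
  | nil => simp
  | cons l ls ih =>
    by_cases hb : PySem.Str.strip l == ""
    · simp [List.findIdx?_cons, hb, pvStepA, foldA_false]
    · have hA : pvStepA (w, d, true) l = (pvStepB w l, d, true) := by
        simp only [pvStepA, pvStepB, hb, Bool.true_and, if_false, Bool.false_eq_true, if_true]
        cases hs : PySem.Str.splitMax? l ":" 1 with
        | none => rfl
        | some xs =>
          match xs with
          | [] => rfl
          | [a] => rfl
          | [a, b] => rfl
          | a :: b :: c :: r => rfl
      rw [List.foldl_cons, hA, ih]
      simp only [List.findIdx?_cons, hb, if_false, Bool.false_eq_true]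
      cases h : ls.findIdx? (fun l => PySem.Str.strip l == "") with
      | none => simp [h]
      | some i => simp [h]

theorem pvCut_le (d : List String) (k : Nat) : pvCut d k ≤ k := by
  induction k with
  | zero => simp [pvCut]
  | succ k ih => simp only [pvCut]; split <;> omega

theorem pvCut_append (d : List String) (x : String) (k : Nat) (hk : k ≤ d.length) :
    pvCut (d ++ [x]) k = pvCut d k := by
  induction k with
  | zero => rfl
  | succ k ih =>
    simp only [pvCut]
    have hlt : k < d.length := by omega
    rw [List.getD_append _ _ _ _ hlt, ih (by omega)]

-- A's pop-while loop computes B's cut-then-slice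
theorem popTrailing_eq_take (d : List String) :
    pvPopTrailing d = d.take (pvCut d d.length) := by
  induction d using List.reverseRecOn with
  | nil => simp [pvPopTrailing, pvCut]
  | append_singleton d x ih =>
    rw [pvPopTrailing]
    simp only [List.getLast?_concat, Option.some.injEq]
    have hget : (d ++ [x]).getD d.length "" = x := by
      simp [List.getD_append_right]
    by_cases hx : x = ""
    · subst hx
      rw [dif_pos rfl, List.dropLast_concat, ih]
      simp only [List.length_append, List.length_singleton, pvCut, hget]
      rw [if_pos (by rfl), pvCut_append d "" d.length le_rfl,
        List.take_append_of_le_length (pvCut_le d d.length)]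
    · rw [dif_neg hx]
      have hx' : (x == "") = false := by simpa using hx
      simp only [List.length_append, List.length_singleton, pvCut, hget, hx']
      simp

-- ===== VERDICT (by name: the statement is the Claim_ definition above) =====
theorem parse_werk_v1_spec : Claim_equal_parse_werk_v1 := by
  intro content werk_id _ _
  unfold Spec_parse_werk_v1 parse_werk_v1 parse_werk_v1_alt
  simp only [foldA_true]
  cases h : ((PySem.Str.split? content "\n").getD []).findIdx? (fun l => PySem.Str.strip l == "") with
  | none => simp [popTrailing_eq_take, pvCut]
  | some i => simp [popTrailing_eq_take]
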